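-- pv_equiv track=rewrite | github.com/yarocruz/advent-of-code | 2024/day-9/part2.py | find_free_segment
-- ===== SOURCE A (Python) =====
-- def find_free_segment(disk, length_needed, right_limit):
--     # Search from the start of the disk up to right_limit - 1
--     # for a contiguous run of '.' of at least length_needed.
--     count = 0
--     start = 0
--     best_start = None
--
--     for i in range(right_limit):
--         if disk[i] == '.':
--             if count == 0:
--                 start = i
--             count += 1
--             if count == length_needed:
--                 # We found a suitable segment
--                 best_start = start
--                 break
--         else:
--             # Reset count if we hit a non-free block
--             count = 0
--
--     return best_start
-- ===== SOURCE B (Python) =====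
-- def find_free_segment(disk, length_needed, right_limit):
--     # Substring search: render the searched window as one character per block
--     # ('.' = free, '#' = used) and locate the first run of dots with str.find.
--     if length_needed <= 0 or right_limit <= 0:
--         return None
--     s = ''.join('.' if block == '.' else '#' for block in disk[:right_limit])
--     idx = s.find('.' * length_needed)
--     return None if idx == -1 else idx
-- ===== Notes on version B (the rewrite author's own statement) =====
-- stated objective: idiomatic
-- what changed: Replaced the manual run-length counter/reset state machine with rendering the window as a '.'/'#' string and locating the first run via str.find on a replicated-dot needle.
-- outside the precondition, e.g. on find_free_segment(['.', '.'], 2, 5): A returns 0, B returns 0; on find_free_segment(['#'], 1, 3): A raises IndexError, B returns None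
import Mathlib
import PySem

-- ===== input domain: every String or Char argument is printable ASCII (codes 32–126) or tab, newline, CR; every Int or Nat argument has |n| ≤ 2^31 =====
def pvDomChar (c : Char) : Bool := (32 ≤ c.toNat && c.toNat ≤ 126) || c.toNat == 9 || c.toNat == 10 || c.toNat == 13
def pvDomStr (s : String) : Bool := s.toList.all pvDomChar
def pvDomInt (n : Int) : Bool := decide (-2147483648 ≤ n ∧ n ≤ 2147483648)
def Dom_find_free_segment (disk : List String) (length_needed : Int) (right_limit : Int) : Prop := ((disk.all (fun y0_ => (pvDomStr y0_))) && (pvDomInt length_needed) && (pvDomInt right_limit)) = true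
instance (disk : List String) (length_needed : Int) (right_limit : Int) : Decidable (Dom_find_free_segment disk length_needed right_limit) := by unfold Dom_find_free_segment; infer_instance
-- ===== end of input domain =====

-- B replaces A's run-length counter state machine by rendering the window as a
-- '.'/'#' character string and using substring search (str.find) for a run of dots;
-- objective: more idiomatic. Return-value equivalence only (neither mutates).

-- ===== PORT A =====
-- the for-loop over range(right_limit) with state (count, start); 'break' = early return
def findA_go (disk : List String) (length_needed : Int) : List Nat → Nat → Nat → Option Int
  | [], _, _ => none
  | i :: rest, count, start =>
    match PySem.List.pyGet? disk (i : Int) with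
    | none => none   -- IndexError (excluded by Pre_)
    | some v =>
      if v = "." then
        let start' := if count = 0 then i else start
        if ((count : Int) + 1) = length_needed then some (start' : Int)
        else findA_go disk length_needed rest (count + 1) start'
      else findA_go disk length_needed rest 0 start

def find_free_segment (disk : List String) (length_needed : Int) (right_limit : Int) : Option Int :=
  findA_go disk length_needed (List.range right_limit.toNat) 0 0

-- ===== PORT B =====
def blockChar (block : String) : Char := if block = "." then '.' else '#'

def find_free_segment_alt (disk : List String) (length_needed : Int) (right_limit : Int) : Option Int :=
  if length_needed ≤ 0 ∨ right_limit ≤ 0 then none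
  else
    let s : List Char := PySem.Chars.join []
      ((PySem.List.slice disk none (some right_limit)).map (fun block => [blockChar block]))
    let idx := PySem.Chars.find s (PySem.List.pyRepeat ['.'] length_needed)
    if idx = -1 then none else some idx

-- ===== PRECONDITION & SPEC =====
-- Pre_ excludes right_limit > len(disk): there A's loop indexes past the end of disk and,
-- unless a segment is found before the end, raises IndexError.
def Pre_find_free_segment (disk : List String) (length_needed : Int) (right_limit : Int) : Prop :=
  right_limit ≤ (disk.length : Int)
instance (disk : List String) (length_needed : Int) (right_limit : Int) : Decidable (Pre_find_free_segment disk length_needed right_limit) := by unfold Pre_find_free_segment; infer_instance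

def pvWitness_find_free_segment : List String × Int × Int := (["#", ".", "."], 2, 3)

def Spec_find_free_segment (disk : List String) (length_needed : Int) (right_limit : Int) (out : Option Int) : Prop := out = find_free_segment_alt disk length_needed right_limit
instance (disk : List String) (length_needed : Int) (right_limit : Int) (out : Option Int) : Decidable (Spec_find_free_segment disk length_needed right_limit out) := by unfold Spec_find_free_segment; infer_instance

-- ===== CLAIM (what is proved, stated in full; the proofs are below) =====
def Claim_equal_find_free_segment : Prop := ∀ (disk : List String) (length_needed : Int) (right_limit : Int), Dom_find_free_segment disk length_needed right_limit → Pre_find_free_segment disk length_needed right_limit → Spec_find_free_segment disk length_needed right_limit (find_free_segment disk length_needed right_limit)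

-- ===== LEMMAS AND PROOFS =====

-- "the n blocks starting at j are all free"
def dotsAt (disk : List String) (n j : Nat) : Bool := decide (∀ k, k < n → disk.getD (j + k) "" = ".")

theorem findA_go_nonpos (disk : List String) (N : Int) (hN : N ≤ 0) :
    ∀ (l : List Nat) (c s : Nat), findA_go disk N l c s = none := by
  intro l
  induction l with
  | nil => intro c s; simp [findA_go]
  | cons i rest ih =>
    intro c s
    simp only [findA_go]
    cases PySem.List.pyGet? disk (i : Int) with
    | none => rfl
    | some v =>
      by_cases hv : v = "."
      · have : ¬ ((c : Nat) : Int) + 1 = N := by omega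
        simp [hv, this, ih]
      · simp [hv, ih]

theorem find?_range'_eq_some (p : Nat → Bool) :
    ∀ (m a j : Nat), a ≤ j → j < a + m → p j = true →
      (∀ t, a ≤ t → t < j → p t = false) →
      (List.range' a m).find? p = some j := by
  intro m
  induction m with
  | zero => intro a j h1 h2; omega
  | succ m ih =>
    intro a j h1 h2 hpj hmin
    rw [List.range'_succ]
    by_cases ha : a = j
    · subst ha; simp [List.find?_cons_of_pos, hpj]
    · have hpa : p a = false := hmin a le_rfl (by omega)
      rw [List.find?_cons_of_neg (by simp [hpa])]
      exact ih (a + 1) j (by omega) (by omega) hpj (fun t ht1 ht2 => hmin t (by omega) ht2)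

theorem find?_range'_shift (p : Nat → Bool) (a m b : Nat) (hab : a ≤ b)
    (hfalse : ∀ j, a ≤ j → j < b → p j = false) :
    (List.range' a m).find? p = (List.range' b (a + m - b)).find? p := by
  by_cases hm : a + m ≤ b
  · have h1 : a + m - b = 0 := by omega
    rw [h1]
    simp only [List.range'_zero, List.find?_nil]
    rw [List.find?_eq_none]
    intro x hx
    rw [List.mem_range'_1] at hx
    simp [hfalse x hx.1 (by omega)]
  · have hsplit : List.range' a (b - a) ++ List.range' b (a + m - b) = List.range' a m := by
      have := List.range'_append (s := a) (m := b - a) (n := a + m - b) (step := 1)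
      simp only [one_mul] at this
      rw [show a + (b - a) = b by omega] at this
      rw [show (b - a) + (a + m - b) = m by omega] at this
      exact this
    rw [← hsplit, List.find?_append]
    have : (List.range' a (b - a)).find? p = none := by
      rw [List.find?_eq_none]
      intro x hx
      rw [List.mem_range'_1] at hx
      simp [hfalse x hx.1 (by omega)]
    simp [this]

theorem loopA_spec (disk : List String) (N : Int) (n : Nat) (hN : (n : Int) = N) (hn : 1 ≤ n) :
    ∀ (k i c s : Nat),
      c < n → c ≤ i →
      (∀ t, t < c → disk.getD (i - c + t) "" = ".") →
      (i - c = 0 ∨ disk.getD (i - c - 1) "" ≠ ".") →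
      (c ≠ 0 → s = i - c) →
      (∀ j, j + n ≤ i → dotsAt disk n j = false) →
      i + k ≤ disk.length →
      findA_go disk N (List.range' i k) c s
        = ((List.range' (i - c) (i + k + 1 - n - (i - c))).find? (dotsAt disk n)).map (fun j => (j : Int)) := by
  intro k
  induction k with
  | zero =>
    intro i c s hc hci hdots hbound hs hwin hlen
    simp only [List.range'_zero, findA_go]
    rw [List.find?_eq_none.mpr ?_]
    · rfl
    · intro j hj
      rw [List.mem_range'_1] at hj
      simp [hwin j (by omega)]
  | succ k ih =>
    intro i c s hc hci hdots hbound hs hwin hlen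
    rw [List.range'_succ]
    have hilen : i < disk.length := by omega
    simp only [findA_go, PySem.List.pyGet?_natCast, List.getElem?_eq_getElem hilen]
    by_cases hv : disk[i] = "."
    · rw [if_pos hv]
      by_cases hcn : ((c : Nat) : Int) + 1 = N
      · -- found: return start'
        have hcn' : c + 1 = n := by omega
        simp only [if_pos hcn]
        have hstart' : (if c = 0 then i else s) = i - c := by
          by_cases h0 : c = 0
          · simp [h0]
          · simp [h0, hs h0]
        rw [hstart']
        -- RHS: find? = some (i - c)
        have hdot_ic : dotsAt disk n (i - c) = true := by
          simp only [dotsAt, decide_eq_true_eq]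
          intro t ht
          by_cases htc : t < c
          · exact hdots t htc
          · have ht' : t = c := by omega
            rw [show i - c + t = i by omega, List.getD_eq_getElem disk "" hilen]
            exact hv
        rw [find?_range'_eq_some _ _ _ (i - c) le_rfl (by omega) hdot_ic (fun t ht1 ht2 => by omega)]
        simp
      · -- continue with count+1
        simp only [if_neg hcn]
        have hcn' : c + 1 ≠ n := by omega
        have hcn2 : c + 1 < n := by omega
        have harg : (if c = 0 then i else s) = (i + 1) - (c + 1) := by
          by_cases h0 : c = 0
          · rw [if_pos h0, h0]; omega
          · rw [if_neg h0, hs h0]; omega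
        rw [harg]
        have := ih (i + 1) (c + 1) ((i + 1) - (c + 1))
          (by omega) (by omega)
          (by
            intro t ht
            rw [show i + 1 - (c + 1) + t = i - c + t by omega]
            by_cases htc : t < c
            · exact hdots t htc
            · have ht' : t = c := by omega
              rw [show i - c + t = i by omega, List.getD_eq_getElem disk "" hilen]
              exact hv)
          (by
            rcases hbound with h | h
            · left; omega
            · right; rw [show i + 1 - (c + 1) - 1 = i - c - 1 by omega]; exact h)
          (fun _ => rfl)
          (by
            intro j hj
            by_cases hji : j + n ≤ i
            · exact hwin j hji
            · -- j + n = i + 1, need i - c - 1 non-dot inside window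
              have hji' : j + n = i + 1 := by omega
              have hic : 1 ≤ i - c := by omega
              simp only [dotsAt, decide_eq_false_iff_not]
              intro hall
              rcases hbound with h | h
              · omega
              · exact h (by
                  have := hall (i - c - 1 - j) (by omega)
                  rwa [show j + (i - c - 1 - j) = i - c - 1 by omega] at this))
          (by omega)
        rw [this]
        rw [show i + 1 - (c + 1) = i - c from by omega]
        rw [show i + 1 + k + 1 - n - (i - c) = i + (k + 1) + 1 - n - (i - c) from by omega]
    · -- non-dot: reset count
      rw [if_neg hv]
      have := ih (i + 1) 0 s (by omega) (by omega)
        (by intro t ht; omega)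
        (by
          right
          rw [show i + 1 - 0 - 1 = i by omega, List.getD_eq_getElem disk "" hilen]
          exact hv)
        (fun h0 => absurd rfl h0)
        (by
          intro j hj
          by_cases hji : j + n ≤ i
          · exact hwin j hji
          · have hji' : j + n = i + 1 := by omega
            simp only [dotsAt, decide_eq_false_iff_not]
            intro hall
            have := hall (n - 1) (by omega)
            rw [show j + (n - 1) = i by omega, List.getD_eq_getElem disk "" hilen] at this
            exact hv this)
        (by omega)
      rw [this]
      simp only [Nat.sub_zero]
      rw [find?_range'_shift (dotsAt disk n) (i - c) (i + (k + 1) + 1 - n - (i - c)) (i + 1) (by omega) ?_]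
      · rw [show i - c + (i + (k + 1) + 1 - n - (i - c)) - (i + 1) = i + 1 + k + 1 - n - (i + 1) from by omega]
      · intro j hj1 hj2
        by_cases hji : j + n ≤ i
        · exact hwin j hji
        · simp only [dotsAt, decide_eq_false_iff_not]
          intro hall
          have := hall (i - j) (by omega)
          rw [show j + (i - j) = i by omega, List.getD_eq_getElem disk "" hilen] at this
          exact hv this

theorem altB_spec (disk : List String) (N rl : Int) (n : Nat) (hN : (n : Int) = N) (hn : 1 ≤ n)
    (hrl : 0 < rl) (hle : rl ≤ (disk.length : Int)) :
    find_free_segment_alt disk N rl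
      = ((List.range' 0 (rl.toNat + 1 - n)).find? (dotsAt disk n)).map (fun j => (j : Int)) := by
  have hm : 0 < rl.toNat := by omega
  have hmlen : rl.toNat ≤ disk.length := by omega
  set m := rl.toNat with hmdef
  have hs : PySem.Chars.join [] ((PySem.List.slice disk none (some rl)).map (fun block => [blockChar block]))
      = (disk.take m).map blockChar := by
    rw [PySem.List.slice_to disk (le_of_lt hrl), ← hmdef]
    rw [show (fun block => [blockChar block]) = (fun c : Char => [c]) ∘ blockChar from rfl]
    rw [← List.map_map, PySem.Chars.join_nil_singletons]
  set s : List Char := (disk.take m).map blockChar with hsdef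
  have hneedle : PySem.List.pyRepeat ['.'] N = List.replicate n '.' := by
    rw [PySem.List.pyRepeat_singleton, ← hN, Int.toNat_natCast]
  have hslen : s.length = m := by
    simp [hsdef]; omega
  have hchar : ∀ (j : Nat) (h : j < m), (s[j]'(by omega) = '.') ↔ disk.getD j "" = "." := by
    intro j hj
    have hjd : j < disk.length := by omega
    have : s[j]'(by omega) = blockChar (disk[j]'hjd) := by
      simp [hsdef, List.getElem_take]
    rw [this, List.getD_eq_getElem disk "" hjd]
    unfold blockChar
    by_cases hb : disk[j]'hjd = "."
    · simp [hb]
    · simp [hb]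
  have hpre : ∀ (j : Nat), (List.replicate n '.' <+: s.drop j) ↔ (j + n ≤ m ∧ dotsAt disk n j = true) := by
    intro j
    constructor
    · intro h
      have hlen' : n ≤ (s.drop j).length := by
        have := h.length_le
        simpa using this
      rw [List.length_drop, hslen] at hlen'
      have hjm : j + n ≤ m := by omega
      refine ⟨hjm, ?_⟩
      have heq := List.prefix_iff_eq_take.mp h
      simp only [List.length_replicate] at heq
      simp only [dotsAt, decide_eq_true_eq]
      intro k hk
      have h1 : (List.replicate n '.')[k]? = some '.' := by simp [hk]
      rw [heq] at h1
      have hk2 : k < (List.take n (s.drop j)).length := by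
        simp [hslen]; omega
      rw [List.getElem?_eq_getElem hk2] at h1
      rw [List.getElem_take, List.getElem_drop] at h1
      exact (hchar (j + k) (by omega)).mp (Option.some.inj h1)
    · rintro ⟨hjm, hdots⟩
      rw [List.prefix_iff_eq_take]
      simp only [List.length_replicate]
      apply List.ext_getElem
      · simp [hslen]; omega
      · intro k hk1 hk2
        rw [List.getElem_replicate, List.getElem_take, List.getElem_drop]
        simp only [dotsAt, decide_eq_true_eq] at hdots
        have hk : k < n := by simpa using hk1
        exact ((hchar (j + k) (by omega)).mpr (hdots k hk)).symm
  unfold find_free_segment_alt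
  rw [if_neg (by push Not; omega)]
  simp only [hs, hneedle]
  by_cases hfind : PySem.Chars.find s (List.replicate n '.') = -1
  · rw [if_pos hfind]
    have hni := (PySem.Chars.find_eq_neg_one_iff s (List.replicate n '.')).mp hfind
    rw [List.find?_eq_none.mpr ?_]
    · rfl
    · intro j hj
      rw [List.mem_range'_1] at hj
      simp only [Bool.not_eq_true]
      by_contra hT
      rw [Bool.not_eq_false] at hT
      have hjm : j + n ≤ m := by omega
      have hp := (hpre j).mpr ⟨hjm, hT⟩
      exact hni (List.infix_iff_prefix_suffix.mpr ⟨s.drop j, hp, List.drop_suffix j s⟩)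
  · rw [if_neg hfind]
    have spec := PySem.Chars.findFrom_natCast_spec s (List.replicate n '.') 0 (Nat.zero_le _)
      (by rw [Nat.cast_zero, PySem.Chars.findFrom_zero]; exact hfind)
    rw [Nat.cast_zero, PySem.Chars.findFrom_zero] at spec
    obtain ⟨hpos, hpref, hmin⟩ := spec
    set F := PySem.Chars.find s (List.replicate n '.') with hFdef
    have hF0 : (0 : Int) ≤ F := by exact_mod_cast hpos
    obtain ⟨hFm, hFdots⟩ := (hpre F.toNat).mp hpref
    rw [find?_range'_eq_some (dotsAt disk n) (m + 1 - n) 0 F.toNat (Nat.zero_le _) (by omega) hFdots ?_]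
    · simp [Int.toNat_of_nonneg hF0]
    · intro t _ ht
      have hnp := hmin t (Nat.zero_le _) ht
      cases h : dotsAt disk n t
      · rfl
      · exact absurd ((hpre t).mpr ⟨by omega, h⟩) hnp

-- ===== VERDICT (by name: the statement is the Claim_ definition above) =====
theorem find_free_segment_spec : Claim_equal_find_free_segment := by
  intro disk N rl _ hpre
  unfold Spec_find_free_segment
  unfold Pre_find_free_segment at hpre
  by_cases hNp : N ≤ 0
  · rw [show find_free_segment disk N rl = none from findA_go_nonpos disk N hNp _ 0 0]
    unfold find_free_segment_alt
    rw [if_pos (Or.inl hNp)]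
  · by_cases hrl : rl ≤ 0
    · have h0 : rl.toNat = 0 := by omega
      unfold find_free_segment
      rw [h0]
      unfold find_free_segment_alt
      rw [if_pos (Or.inr hrl)]
      simp [findA_go]
    · have hrl' : 0 < rl := by omega
      have hN : ((N.toNat : Nat) : Int) = N := Int.toNat_of_nonneg (by omega)
      have hn : 1 ≤ N.toNat := by omega
      unfold find_free_segment
      rw [List.range_eq_range']
      rw [loopA_spec disk N N.toNat hN hn rl.toNat 0 0 0
        (by omega) (by omega)
        (fun t ht => absurd ht (Nat.not_lt_zero t))
        (Or.inl rfl)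
        (fun h => absurd rfl h)
        (fun j hj => absurd hj (by omega))
        (by omega)]
      rw [altB_spec disk N rl N.toNat hN hn hrl' hpre]
      rw [show (0 : Nat) - 0 = 0 from rfl, show 0 + rl.toNat + 1 - N.toNat - 0 = rl.toNat + 1 - N.toNat from by omega]
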